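-- pv_equiv track=rewrite | github.com/inmzhang/leaky | src/leaky/twirling.py | _get_projector_slice
-- ===== SOURCE A (Python) =====
-- from typing import List, Sequence, Tuple
--
-- ProjectSpaces = Tuple[Tuple[int, ...], ...]
--
-- def _get_projector_slice(
--     num_level: int,
--     project_status: ProjectSpaces,
-- ) -> List[int]:
--     """Get slice into the matrix for the subspace projection defined by project_status."""
--     num_qubits = len(project_status)
--     status = project_status[0]
--     if num_qubits == 1:
--         return list(status)
--     tail_slice = _get_projector_slice(num_level, project_status[1:])
--     return [x + s * num_level ** (num_qubits - 1) for s in status for x in tail_slice]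
-- ===== SOURCE B (Python) =====
-- from typing import List, Sequence, Tuple
--
-- ProjectSpaces = Tuple[Tuple[int, ...], ...]
--
-- def _get_projector_slice(
--     num_level: int,
--     project_status: ProjectSpaces,
-- ) -> List[int]:
--     """Iterative Horner-style build: one left-to-right pass, no recursion or powers."""
--     acc = [0]
--     for status in project_status:
--         acc = [a * num_level + s for a in acc for s in status]
--     return acc
-- ===== Notes on version B (the rewrite author's own statement) =====
-- stated objective: alternative
-- what changed: Replaces the recursive tail-slice build with explicit num_level**(n-1) powers by a single left-to-right fold that Horner-combines each position (acc = [a*num_level + s]), no recursion and no power computation. (On empty project_status, outside Pre_, A raises IndexError while B returns [0].)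
import Mathlib
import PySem

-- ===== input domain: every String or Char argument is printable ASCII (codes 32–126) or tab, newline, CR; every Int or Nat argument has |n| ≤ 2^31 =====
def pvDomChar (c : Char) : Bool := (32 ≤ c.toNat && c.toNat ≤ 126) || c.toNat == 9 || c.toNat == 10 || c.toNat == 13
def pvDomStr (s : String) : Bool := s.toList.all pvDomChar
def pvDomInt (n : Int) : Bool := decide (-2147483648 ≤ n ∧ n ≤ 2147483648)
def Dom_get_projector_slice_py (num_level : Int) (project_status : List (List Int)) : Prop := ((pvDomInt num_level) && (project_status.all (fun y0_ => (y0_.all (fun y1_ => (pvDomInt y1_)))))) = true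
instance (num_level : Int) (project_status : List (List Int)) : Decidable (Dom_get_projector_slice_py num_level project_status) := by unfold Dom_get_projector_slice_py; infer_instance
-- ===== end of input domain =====

-- B replaces A's recursion with positional powers by one left-to-right Horner fold (objective: alternative, same cost); on empty project_status A raises IndexError while B returns [0] (outside Pre_).

-- ===== PORT A =====
-- literal transliteration of A: project_status[0] raises on [], so the [] branch is
-- unreachable under Pre_ and returns a dummy []
def get_projector_slice_py (num_level : Int) (project_status : List (List Int)) : List Int :=
  match project_status with
  | [] => []  -- Python raises IndexError here; excluded by Pre_
  | status :: rest =>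
      let num_qubits := (status :: rest).length
      if num_qubits = 1 then status
      else
        let tail_slice := get_projector_slice_py num_level rest
        status.flatMap (fun s => tail_slice.map (fun x => x + s * num_level ^ (num_qubits - 1)))

-- ===== PORT B =====
def get_projector_slice_py_alt (num_level : Int) (project_status : List (List Int)) : List Int :=
  project_status.foldl
    (fun acc status => acc.flatMap (fun a => status.map (fun s => a * num_level + s))) [0]

-- ===== PRECONDITION & SPEC =====
-- Pre_ excludes only the empty outer tuple, on which A raises IndexError at project_status[0].
def Pre_get_projector_slice_py (num_level : Int) (project_status : List (List Int)) : Prop :=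
  project_status ≠ []
instance (num_level : Int) (project_status : List (List Int)) : Decidable (Pre_get_projector_slice_py num_level project_status) := by unfold Pre_get_projector_slice_py; infer_instance
def pvWitness_get_projector_slice_py : Int × List (List Int) := (3, [[0, 2], [1]])

def Spec_get_projector_slice_py (num_level : Int) (project_status : List (List Int)) (out : List Int) : Prop := out = get_projector_slice_py_alt num_level project_status
instance (num_level : Int) (project_status : List (List Int)) (out : List Int) : Decidable (Spec_get_projector_slice_py num_level project_status out) := by unfold Spec_get_projector_slice_py; infer_instance

-- ===== CLAIM (what is proved, stated in full; the proofs are below) =====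
def Claim_equal_get_projector_slice_py : Prop := ∀ (num_level : Int) (project_status : List (List Int)), Dom_get_projector_slice_py num_level project_status → Pre_get_projector_slice_py num_level project_status → Spec_get_projector_slice_py num_level project_status (get_projector_slice_py num_level project_status)
-- ===== LEMMAS AND PROOFS =====

-- The fold from any accumulator equals the fold from [0], each base value offset by a * L^len.
theorem pvFold_shift (L : Int) (ps : List (List Int)) (acc : List Int) :
    ps.foldl (fun acc status => acc.flatMap (fun a => status.map (fun s => a * L + s))) acc
    = acc.flatMap (fun a =>
        (ps.foldl (fun acc status => acc.flatMap (fun a => status.map (fun s => a * L + s))) [0]).map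
          (fun v => a * L ^ ps.length + v)) := by
  induction ps generalizing acc with
  | nil => simp
  | cons st rest ih =>
    simp only [List.foldl_cons, List.length_cons]
    rw [ih ((acc.flatMap (fun a => st.map (fun s => a * L + s)))),
        ih (([0] : List Int).flatMap (fun a => st.map (fun s => a * L + s)))]
    simp only [List.flatMap_assoc, List.flatMap_map, List.map_map, List.map_flatMap,
      List.flatMap_cons, List.flatMap_nil, List.append_nil]
    apply List.flatMap_congr
    intro a _
    apply List.flatMap_congr
    intro s _
    apply List.map_congr_left
    intro v _
    simp only [Function.comp_apply]
    ring

-- Unfolding B's fold one outer step, as a flatMap over the head statuses.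
theorem pvAlt_cons (L : Int) (st : List Int) (rest : List (List Int)) :
    get_projector_slice_py_alt L (st :: rest)
    = st.flatMap (fun s =>
        (get_projector_slice_py_alt L rest).map (fun v => s * L ^ rest.length + v)) := by
  unfold get_projector_slice_py_alt
  rw [List.foldl_cons,
      pvFold_shift L rest (([0] : List Int).flatMap (fun a => st.map (fun s => a * L + s)))]
  simp

theorem pvEq (L : Int) (ps : List (List Int)) (h : ps ≠ []) :
    get_projector_slice_py L ps = get_projector_slice_py_alt L ps := by
  induction ps with
  | nil => exact absurd rfl h
  | cons st rest ih =>
    cases rest with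
    | nil =>
      simp [get_projector_slice_py, get_projector_slice_py_alt]
    | cons r rs =>
      have hr : (r :: rs : List (List Int)) ≠ [] := by simp
      have hA : get_projector_slice_py L (st :: r :: rs)
          = st.flatMap (fun s => (get_projector_slice_py L (r :: rs)).map
              (fun x => x + s * L ^ (rs.length + 1))) := by
        simp [get_projector_slice_py]
      rw [hA, ih hr, pvAlt_cons L st (r :: rs)]
      apply List.flatMap_congr
      intro s _
      apply List.map_congr_left
      intro v _
      simp only [List.length_cons]
      ring

-- ===== VERDICT (by name: the statement is the Claim_ definition above) =====
theorem get_projector_slice_py_spec : Claim_equal_get_projector_slice_py := by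
  intro L ps _ hpre
  unfold Spec_get_projector_slice_py
  exact pvEq L ps hpre
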